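-- pv_equiv track=rewrite | github.com/nizza/advent_of_code_2023 | day_14.py | get_wall_positions
-- ===== SOURCE A (Python) =====
-- def get_wall_positions(platform):
--     """
--     Computes the positions of the fixed stones, for each row
--     and for each column.
--     Returns two matices:
--      - walls_by_row: for each row, provides the column index of the
--                    fixed stones;
--      - walls_by_col: for each column, provides the column index of the
--                    fixed stones;
--     """
--
--     R = len(platform)
--     C = len(platform[0])
--
--     # initializing the results
--     walls_by_row = [[] for i in range(R)]
--     walls_by_col = [[] for i in range(C)]
--
--     for i in range(R):
--         for j in range(C):
--
--             if platform[i][j] == '#':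
--                 walls_by_row[i].append(j)
--                 walls_by_col[j].append(i)
--
--     return walls_by_row, walls_by_col
-- ===== SOURCE B (Python) =====
-- def get_wall_positions(platform):
--     """
--     Computes the positions of the fixed stones for each row and for
--     each column, by applying ONE one-dimensional extractor twice:
--     once to the rows, and once to the transposed grid (the columns).
--     """
--     def wall_indices(line):
--         return [k for k, cell in enumerate(line) if cell == '#']
--
--     width = len(platform[0])
--     rows = [r[:width] for r in platform]
--     walls_by_row = [wall_indices(r) for r in rows]
--     walls_by_col = [wall_indices(col) for col in zip(*rows)]
--     return walls_by_row, walls_by_col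
-- ===== Notes on version B (the rewrite author's own statement) =====
-- stated objective: alternative
-- what changed: A fills both result matrices simultaneously in one fused nested index scan with in-place appends; B defines a single one-dimensional extractor wall_indices and applies it twice to different data: once to each (width-clipped) row, and once to each column of the grid obtained by transposing the rows with zip(*rows), so no two-dimensional index scan or shared mutable state remains.
import Mathlib
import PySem

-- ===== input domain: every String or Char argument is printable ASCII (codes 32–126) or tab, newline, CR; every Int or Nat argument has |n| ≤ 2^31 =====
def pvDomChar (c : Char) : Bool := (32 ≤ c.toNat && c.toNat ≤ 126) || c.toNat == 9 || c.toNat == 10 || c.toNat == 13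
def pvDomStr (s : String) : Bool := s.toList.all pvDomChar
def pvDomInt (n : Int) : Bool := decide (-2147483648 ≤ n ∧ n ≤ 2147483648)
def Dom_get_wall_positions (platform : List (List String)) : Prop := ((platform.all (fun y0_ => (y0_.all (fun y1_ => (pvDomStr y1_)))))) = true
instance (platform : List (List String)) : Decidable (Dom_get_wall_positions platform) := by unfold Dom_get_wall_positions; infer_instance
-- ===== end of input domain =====

-- B computes both matrices by applying one 1-D extractor (wall_indices) twice:
-- to the width-clipped rows and to the zip(*rows) transpose; A instead fills both
-- matrices at once in a fused nested index scan. Same cost, different decomposition.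


-- ===== PORT A =====
-- literal transliteration of A: one fused nested scan over (i, j), appending into
-- both result matrices held together as the fold state.
def get_wall_positions (platform : List (List String)) : List (List Int) × List (List Int) :=
  let R : Int := (platform.length : Int)
  let C : Int := (((PySem.List.pyGet? platform 0).getD []).length : Int)
  let walls_by_row : List (List Int) := (PySem.List.pyRange 0 R 1).map (fun _ => [])
  let walls_by_col : List (List Int) := (PySem.List.pyRange 0 C 1).map (fun _ => [])
  (PySem.List.pyRange 0 R 1).foldl (fun st i =>
    (PySem.List.pyRange 0 C 1).foldl (fun st j =>
      if ((PySem.List.pyGet? platform i).bind (fun r => PySem.List.pyGet? r j)) == some "#"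
      then (st.1.modify i.toNat (fun l => l ++ [j]), st.2.modify j.toNat (fun l => l ++ [i]))
      else st) st) (walls_by_row, walls_by_col)

-- ===== PORT B =====
-- wall_indices(line) = [k for k, cell in enumerate(line) if cell == '#']
def pvWallIndices (line : List String) : List Int :=
  ((PySem.List.enumerate line 0).filter (fun p => p.2 == "#")).map (fun p => p.1)

-- zip(*rs): columns truncated to the shortest row (ported by hand; exact: the
-- number of tuples zip yields is the minimum length, each tuple collects r[j])
def pvZip (rs : List (List String)) : List (List String) :=
  match rs with
  | [] => []
  | r0 :: rest =>
    (List.range (rest.foldl (fun m r => min m r.length) r0.length)).map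
      (fun j => (r0 :: rest).map (fun r => r.getD j ""))

-- literal transliteration of B: clip rows, extract per row, transpose, extract per column.
def get_wall_positions_alt (platform : List (List String)) : List (List Int) × List (List Int) :=
  let width : Int := (((PySem.List.pyGet? platform 0).getD []).length : Int)
  let rows : List (List String) := platform.map (fun r => PySem.List.slice r none (some width))
  (rows.map pvWallIndices, (pvZip rows).map pvWallIndices)

-- ===== PRECONDITION & SPEC =====
-- Pre_ excludes exactly the inputs where the Python A raises IndexError: the empty
-- platform, and ragged platforms with a row shorter than the first.
def Pre_get_wall_positions (platform : List (List String)) : Prop :=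
  platform ≠ [] ∧ ∀ r ∈ platform, (platform.headD []).length ≤ r.length
instance (platform : List (List String)) : Decidable (Pre_get_wall_positions platform) := by unfold Pre_get_wall_positions; infer_instance
def pvWitness_get_wall_positions : List (List String) := [["#", "."], [".", "#"], ["#", "#"]]


def Spec_get_wall_positions (platform : List (List String)) (out : List (List Int) × List (List Int)) : Prop := out = get_wall_positions_alt platform
instance (platform : List (List String)) (out : List (List Int) × List (List Int)) : Decidable (Spec_get_wall_positions platform out) := by unfold Spec_get_wall_positions; infer_instance

-- ===== CLAIM (what is proved, stated in full; the proofs are below) =====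
def Claim_equal_get_wall_positions : Prop := ∀ (platform : List (List String)), Dom_get_wall_positions platform → Pre_get_wall_positions platform → Spec_get_wall_positions platform (get_wall_positions platform)

-- ===== LEMMAS AND PROOFS =====

theorem pv_modify_append {α : Type} (pre : List α) (c : α) (rest : List α) (f : α → α) :
    (pre ++ c :: rest).modify pre.length f = pre ++ f c :: rest := by
  induction pre with
  | nil => simp
  | cons a t ih => simpa [List.modify_succ_cons] using ih

theorem pv_modify_append2 {α : Type} (pre : List α) (c : α) (rest : List α) (f : α → α)
    (k : Nat) (hk : k = pre.length) :
    (pre ++ c :: rest).modify k f = pre ++ f c :: rest := by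
  subst hk; exact pv_modify_append pre c rest f

theorem pv_modify_id {α : Type} (l : List α) (k : Nat) :
    l.modify k (fun x => x) = l := by
  induction l generalizing k with
  | nil => simp
  | cons a t ih => cases k <;> simp [List.modify_zero_cons, List.modify_succ_cons, ih]

-- the per-column updates one pass of A's inner loop performs on walls_by_col
def pvColUpd (cond : Int → Int → Bool) (i a : Int) : List (List Int) → List (List Int)
  | [] => []
  | c :: rest => (if cond i a then c ++ [i] else c) :: pvColUpd cond i (a + 1) rest

-- INNER LOOP: one full pass of A's j-loop appends the row's wall columns to
-- walls_by_row[i] and performs pvColUpd on walls_by_col.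
theorem pv_inner (cond : Int → Int → Bool) (i : Int) :
    ∀ (suffix pre wbr : List (List Int)) (a b : Int), 0 ≤ a → pre.length = a.toNat →
    b = a + (suffix.length : Int) →
    (PySem.List.pyRange a b 1).foldl (fun st j =>
        if cond i j
        then (st.1.modify i.toNat (fun l => l ++ [j]), st.2.modify j.toNat (fun l => l ++ [i]))
        else st) (wbr, pre ++ suffix)
    = (wbr.modify i.toNat (fun l => l ++ (PySem.List.pyRange a b 1).filter (cond i)),
       pre ++ pvColUpd cond i a suffix) := by
  intro suffix
  induction suffix with
  | nil =>
    intro pre wbr a b ha hpre hb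
    subst hb
    simp [PySem.List.pyRange_one_eq_nil, pvColUpd, pv_modify_id]
  | cons c rest ih =>
    intro pre wbr a b ha hpre hb
    subst hb
    have hlt : a < a + ((c :: rest).length : Int) := by
      have : (0:Int) < ((c :: rest).length : Int) := by exact_mod_cast Nat.succ_pos rest.length
      omega
    rw [PySem.List.pyRange_one_cons hlt]
    simp only [List.foldl_cons, List.filter_cons]
    have hmod : (pre ++ c :: rest).modify a.toNat (fun l => l ++ [i]) = pre ++ (c ++ [i]) :: rest := by
      rw [← hpre, pv_modify_append]
    have hb' : a + ((c :: rest).length : Int) = (a + 1) + (rest.length : Int) := by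
      simp only [List.length_cons]; push_cast; ring
    by_cases hc : cond i a = true
    · simp only [hc, if_true]
      rw [hmod]
      have hsplit : pre ++ (c ++ [i]) :: rest = (pre ++ [c ++ [i]]) ++ rest := by simp
      rw [hsplit]
      rw [ih (pre ++ [c ++ [i]]) (wbr.modify i.toNat (fun l => l ++ [a]))
        (a + 1) (a + ((c :: rest).length : Int)) (by omega)
        (by simp [hpre]; omega) hb']
      simp only [Prod.mk.injEq]
      refine ⟨?_, ?_⟩
      · rw [List.modify_modify_eq]
        congr 1
        funext l
        simp [Function.comp]
      · simp [pvColUpd, hc]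
    · simp only [hc, if_false, Bool.false_eq_true]
      have hsplit : pre ++ c :: rest = (pre ++ [c]) ++ rest := by simp
      rw [hsplit]
      rw [ih (pre ++ [c]) wbr (a + 1) (a + ((c :: rest).length : Int)) (by omega)
        (by simp [hpre]; omega) hb']
      simp only [Prod.mk.injEq]
      refine ⟨?_, ?_⟩
      · simp
      · simp [pvColUpd, hc]

-- pvColUpd on a range-indexed map acts pointwise
theorem pv_colUpd_map (cond : Int → Int → Bool) (i : Int) (g : Int → List Int) :
    ∀ (W : Nat) (a b : Int), b = a + (W : Int) →
    pvColUpd cond i a ((PySem.List.pyRange a b 1).map g)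
    = (PySem.List.pyRange a b 1).map (fun j => if cond i j then g j ++ [i] else g j) := by
  intro W
  induction W with
  | zero =>
    intro a b hb
    subst hb
    simp [PySem.List.pyRange_one_eq_nil, pvColUpd]
  | succ W ih =>
    intro a b hb
    subst hb
    have hlt : a < a + ((W + 1 : Nat) : Int) := by push_cast; omega
    rw [PySem.List.pyRange_one_cons hlt]
    have hb' : a + ((W + 1 : Nat) : Int) = (a + 1) + (W : Int) := by push_cast; ring
    simp only [List.map_cons, pvColUpd]
    rw [hb', ih (a + 1) _ rfl]

-- OUTER LOOP: the fused scan, characterized row by row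
theorem pv_outer (cond : Int → Int → Bool) (n W : Nat) :
    ∀ m ≤ n,
    (PySem.List.pyRange 0 (m : Int) 1).foldl (fun st i =>
        (PySem.List.pyRange 0 (W : Int) 1).foldl (fun st j =>
          if cond i j
          then (st.1.modify i.toNat (fun l => l ++ [j]), st.2.modify j.toNat (fun l => l ++ [i]))
          else st) st)
      (List.replicate n [], List.replicate W [])
    = ((List.range m).map (fun (ii : Nat) => (PySem.List.pyRange 0 (W : Int) 1).filter (cond (ii : Int)))
         ++ List.replicate (n - m) [],
       (PySem.List.pyRange 0 (W : Int) 1).map (fun j =>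
         (PySem.List.pyRange 0 (m : Int) 1).filter (fun ii => cond ii j))) := by
  intro m
  induction m with
  | zero =>
    intro _
    simp [PySem.List.pyRange_one_eq_nil]
  | succ m ih =>
    intro hm
    have hsr : PySem.List.pyRange 0 ((m + 1 : Nat) : Int) 1
        = PySem.List.pyRange 0 (m : Int) 1 ++ [(m : Int)] := by
      have h1 : ((m + 1 : Nat) : Int) = (m : Int) + 1 := by push_cast; ring
      rw [h1, PySem.List.pyRange_one_succ_right (by positivity)]
    rw [hsr, List.foldl_append, ih (by omega)]
    simp only [List.foldl_cons, List.foldl_nil]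
    have hwbc_len : ((PySem.List.pyRange 0 (W : Int) 1).map (fun j =>
        (PySem.List.pyRange 0 (m : Int) 1).filter (fun ii => cond ii j))).length = W := by
      simp [PySem.List.length_pyRange_one]
    have hinner := pv_inner cond (m : Int)
      ((PySem.List.pyRange 0 (W : Int) 1).map (fun j =>
        (PySem.List.pyRange 0 (m : Int) 1).filter (fun ii => cond ii j)))
      []
      ((List.range m).map (fun (ii : Nat) => (PySem.List.pyRange 0 (W : Int) 1).filter (cond (ii : Int)))
         ++ List.replicate (n - m) [])
      0 (W : Int) le_rfl rfl (by rw [hwbc_len]; ring)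
    simp only [List.nil_append] at hinner
    rw [hinner]
    simp only [Prod.mk.injEq]
    constructor
    · -- row component
      have hrep : List.replicate (n - m) ([] : List Int)
          = ([] : List Int) :: List.replicate (n - m - 1) [] := by
        have h2 : n - m = (n - m - 1) + 1 := by omega
        conv_lhs => rw [h2]
        rw [List.replicate_succ]
      rw [hrep, pv_modify_append2 _ _ _ _ _ (by simp)]
      have h3 : n - (m + 1) = n - m - 1 := by omega
      rw [List.range_succ]
      simp [h3]
    · -- column component
      rw [pv_colUpd_map cond (m : Int) _ W 0 (W : Int) (by ring)]
      apply List.map_congr_left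
      intro j hj
      rw [List.filter_append]
      by_cases h : cond (m : Int) j = true <;> simp [h]

-- pvWallIndices characterized as a range filter
theorem pv_wallIdx (l : List String) :
    pvWallIndices l
    = (PySem.List.pyRange 0 (l.length : Int) 1).filter
        (fun j => PySem.List.pyGet? l j == some "#") := by
  unfold pvWallIndices
  rw [PySem.List.enumerate_eq_map_pyRange (d := "")]
  simp only [List.filter_map, List.map_map, Function.comp_def, List.map_id']
  apply List.filter_congr
  intro j hj
  rw [PySem.List.mem_pyRange_one] at hj
  obtain ⟨h0, hW⟩ := hj
  obtain ⟨k, rfl⟩ : ∃ k : Nat, j = (k : Int) := ⟨j.toNat, (Int.toNat_of_nonneg h0).symm⟩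
  have hk : k < l.length := by simp [PySem.List.len] at hW; exact_mod_cast hW
  simp [PySem.List.pyGet?_natCast, PySem.List.pyGetD,
    List.getElem?_eq_getElem hk]

-- the min-length fold is W when every row has length W
theorem pv_minfold (W : Nat) :
    ∀ (rs : List (List String)), (∀ r ∈ rs, r.length = W) →
    rs.foldl (fun m r => min m r.length) W = W := by
  intro rs
  induction rs with
  | nil => intro _; rfl
  | cons r t ih =>
    intro h
    simp only [List.foldl_cons, h r (by simp), min_self]
    exact ih (fun x hx => h x (by simp [hx]))

-- ===== VERDICT proofs =====
theorem get_wall_positions_spec : Claim_equal_get_wall_positions := by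
  intro platform _ hpre
  obtain ⟨hne, hlen⟩ := hpre
  unfold Spec_get_wall_positions get_wall_positions get_wall_positions_alt
  simp only []
  -- abbreviations
  set W : Nat := ((PySem.List.pyGet? platform 0).getD []).length with hW
  set R : Nat := platform.length with hR
  have hhead : (PySem.List.pyGet? platform 0).getD [] = platform.headD [] := by
    cases platform with
    | nil => simp at hne
    | cons a t => simp [PySem.List.pyGet?, PySem.List.pyIdx?]
  have hWle : ∀ r ∈ platform, W ≤ r.length := by
    intro r hr; rw [hW, hhead]; exact hlen r hr
  set cond : Int → Int → Bool :=
    fun i j => ((PySem.List.pyGet? platform i).bind (fun r => PySem.List.pyGet? r j)) == some "#"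
    with hcond
  -- reduce A to canonical form
  have hinit_r : (PySem.List.pyRange 0 (R : Int) 1).map (fun _ => ([] : List Int))
      = List.replicate R [] := by
    rw [PySem.List.pyRange_one]
    refine List.eq_replicate_iff.mpr ⟨by simp, ?_⟩
    intro b hb; simp at hb; exact hb.2
  have hinit_c : (PySem.List.pyRange 0 (W : Int) 1).map (fun _ => ([] : List Int))
      = List.replicate W [] := by
    rw [PySem.List.pyRange_one]
    refine List.eq_replicate_iff.mpr ⟨by simp, ?_⟩
    intro b hb; simp at hb; exact hb.2
  rw [hinit_r, hinit_c, pv_outer cond R W R le_rfl]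
  -- rows of B
  have hrowslen : ∀ r ∈ platform,
      (PySem.List.slice r none (some (W : Int))).length = W := by
    intro r hr
    rw [PySem.List.slice_to_natCast]
    simp [Nat.min_eq_left (hWle r hr)]
  have hget_take : ∀ r ∈ platform, ∀ k : Nat, k < W →
      PySem.List.pyGet? (PySem.List.slice r none (some (W : Int))) (k : Int)
      = PySem.List.pyGet? r (k : Int) := by
    intro r hr k hk
    have hkr : k < r.length := lt_of_lt_of_le hk (hWle r hr)
    rw [PySem.List.slice_to_natCast]
    simp [PySem.List.pyGet?_natCast, List.getElem?_take,
      List.getElem?_eq_getElem hkr, hk]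
  -- B's row part equals canonical row part
  have hrows : (platform.map (fun r => PySem.List.slice r none (some (W : Int)))).map pvWallIndices
      = (List.range R).map (fun (ii : Nat) =>
          (PySem.List.pyRange 0 (W : Int) 1).filter (cond (ii : Int))) := by
    rw [List.map_map]
    apply List.ext_getElem (by simp [hR])
    intro n h1 h2
    simp only [List.getElem_map, List.getElem_range, Function.comp]
    have hn : n < platform.length := by simpa [hR] using h1
    have hmem : platform[n] ∈ platform := List.getElem_mem hn
    rw [pv_wallIdx, hrowslen platform[n] hmem]
    apply List.filter_congr
    intro j hj
    rw [PySem.List.mem_pyRange_one] at hj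
    obtain ⟨h0, hjW⟩ := hj
    obtain ⟨k, rfl⟩ : ∃ k : Nat, j = (k : Int) := ⟨j.toNat, (Int.toNat_of_nonneg h0).symm⟩
    have hkW : k < W := by exact_mod_cast hjW
    rw [hget_take platform[n] hmem k hkW]
    simp [hcond, PySem.List.pyGet?_natCast, List.getElem?_eq_getElem hn]
  -- B's column part equals canonical column part
  set rows : List (List String) := platform.map (fun r => PySem.List.slice r none (some (W : Int)))
    with hrowsdef
  have hrlen : ∀ r ∈ rows, r.length = W := by
    intro r hr
    rw [hrowsdef] at hr
    obtain ⟨x, hx, rfl⟩ := List.mem_map.mp hr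
    exact hrowslen x hx
  have hcols : (pvZip rows).map pvWallIndices
      = (PySem.List.pyRange 0 (W : Int) 1).map (fun j =>
          (PySem.List.pyRange 0 (R : Int) 1).filter (fun ii => cond ii j)) := by
    cases hrows0 : rows with
    | nil =>
      exfalso
      have : platform = [] := by
        have := congrArg List.length hrows0
        simpa [hrowsdef] using this
      exact hne this
    | cons r0 rest =>
      simp only [pvZip]
      have hr0 : r0.length = W := hrlen r0 (by rw [hrows0]; simp)
      have hfold : rest.foldl (fun m r => min m r.length) r0.length = W := by
        rw [hr0]
        exact pv_minfold W rest (fun r hr => hrlen r (by rw [hrows0]; simp [hr]))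
      rw [hfold, List.map_map]
      apply List.ext_getElem (by simp [PySem.List.length_pyRange_one])
      intro k h1 h2
      have hkW : k < W := by simpa using h1
      simp only [List.getElem_map, List.getElem_range, Function.comp,
        PySem.List.getElem_pyRange_one, zero_add]
      have hlenR : (r0 :: rest).length = R := by
        have := congrArg List.length hrows0
        simpa [hrowsdef, hR] using this.symm
      have hcollen : ((r0 :: rest).map (fun r => r.getD k "")).length = R := by
        rw [List.length_map, hlenR]
      rw [pv_wallIdx, hcollen]
      apply List.filter_congr
      intro i hi
      rw [PySem.List.mem_pyRange_one] at hi
      obtain ⟨h0, hiR⟩ := hi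
      obtain ⟨n, rfl⟩ : ∃ n : Nat, i = (n : Int) := ⟨i.toNat, (Int.toNat_of_nonneg h0).symm⟩
      have hnR : n < platform.length := by rw [← hR]; exact_mod_cast hiR
      have hnrows : n < (r0 :: rest).length := by
        rw [hlenR, hR]; exact hnR
      have hmem : platform[n] ∈ platform := List.getElem_mem hnR
      have hgetrow : (r0 :: rest)[n] = PySem.List.slice platform[n] none (some (W : Int)) := by
        have h? : (r0 :: rest)[n]? = some (PySem.List.slice platform[n] none (some (W : Int))) := by
          rw [← hrows0]
          simp [hrowsdef, List.getElem?_eq_getElem hnR]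
        rw [List.getElem?_eq_getElem hnrows] at h?
        exact Option.some.inj h?
      have hcell : (r0 :: rest)[n].getD k ""
          = platform[n].getD k "" := by
        rw [hgetrow, PySem.List.slice_to_natCast]
        have hkr : k < platform[n].length := lt_of_lt_of_le hkW (hWle _ hmem)
        simp [List.getD, List.getElem?_take, hkW, List.getElem?_eq_getElem hkr]
      have hkr : k < platform[n].length := lt_of_lt_of_le hkW (hWle _ hmem)
      have hL : PySem.List.pyGet? ((r0 :: rest).map (fun r => r.getD k "")) (n : Int)
          = some (platform[n].getD k "") := by
        rw [PySem.List.pyGet?_natCast, List.getElem?_map, List.getElem?_eq_getElem hnrows]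
        simp only [Option.map_some]
        rw [hcell]
      have hRc : cond (n : Int) (k : Int) = (platform[n][k] == "#") := by
        simp [hcond, PySem.List.pyGet?_natCast, List.getElem?_eq_getElem hnR,
          List.getElem?_eq_getElem hkr]
      rw [hL, hRc]
      simp [List.getD, List.getElem?_eq_getElem hkr]
  rw [hrows, hcols]
  simp [hR]
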